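-- pv_equiv track=rewrite | github.com/YafiW/Full-machine-learmimg-project-CulinAIry-Creations- | Backend/Step_1/vector_processing_of_the_ingridients.py | remove_repeated_words
-- ===== SOURCE A (Python) =====
-- def remove_repeated_words(string):
--     string_lower = string.lower()
--     words = string_lower.split()
--     word_count = {}
--     for word in words:
--         word_count[word] = word_count.get(word, 0) + 1
--     repeated_words = set(word for word, count in word_count.items() if count > 1)
--     cleaned_words = ['' if word in repeated_words else word for word in words]
--     cleaned_string = ' '.join(cleaned_words).strip()
--
--     return cleaned_string
-- ===== SOURCE B (Python) =====
-- def remove_repeated_words(string):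
--     words = string.lower().split()
--     sorted_words = sorted(words)
--     repeated = {a for a, b in zip(sorted_words, sorted_words[1:]) if a == b}
--     return ' '.join('' if w in repeated else w for w in words).strip()
-- ===== Notes on version B (the rewrite author's own statement) =====
-- stated objective: alternative
-- what changed: B builds the repeated-words set by sorting the word list and scanning adjacent pairs for duplicates (sort + adjacency scan) instead of A's hash-table frequency count filtered for count > 1; the blanking pass over the original word order is then expressed as one join over a comprehension.
import Mathlib
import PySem

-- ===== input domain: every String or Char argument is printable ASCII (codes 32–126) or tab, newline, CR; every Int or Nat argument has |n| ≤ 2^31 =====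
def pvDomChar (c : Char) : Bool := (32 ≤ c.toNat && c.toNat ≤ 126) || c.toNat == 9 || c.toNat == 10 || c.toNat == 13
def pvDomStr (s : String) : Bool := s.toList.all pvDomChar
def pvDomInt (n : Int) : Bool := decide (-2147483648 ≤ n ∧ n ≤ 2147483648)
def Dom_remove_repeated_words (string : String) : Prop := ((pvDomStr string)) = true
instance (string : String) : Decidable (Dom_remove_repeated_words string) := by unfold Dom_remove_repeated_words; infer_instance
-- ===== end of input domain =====

-- B replaces A's hash-table frequency pass with sort + adjacent-duplicate scan to build
-- the repeated-words set (alternative algorithm, similar cost); same return value everywhere.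

-- ===== PORT A =====
def remove_repeated_words (string : String) : String :=
  let string_lower := PySem.Str.lower string
  let words := PySem.Str.split₀ string_lower
  let word_count : PySem.Dict String Int :=
    words.foldl (fun d word => d.insert word (d.getD word 0 + 1)) PySem.Dict.empty
  let repeated_words : PySem.Set String :=
    PySem.Set.ofList ((word_count.items.filter (fun p => p.2 > 1)).map (fun p => p.1))
  let cleaned_words := words.map (fun word => if repeated_words.contains word then "" else word)
  PySem.Str.strip (PySem.Str.join " " cleaned_words)

-- ===== PORT B =====
-- sorted_words[1:] is ported as .tail (exact: drop of the first element)
def remove_repeated_words_alt (string : String) : String :=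
  let words := PySem.Str.split₀ (PySem.Str.lower string)
  let sorted_words := PySem.List.sorted words (fun x => x)
  let repeated : PySem.Set String :=
    PySem.Set.ofList
      (((sorted_words.zip sorted_words.tail).filter (fun p => p.1 == p.2)).map (fun p => p.1))
  PySem.Str.strip
    (PySem.Str.join " " (words.map (fun w => if repeated.contains w then "" else w)))

-- ===== PRECONDITION & SPEC =====
def Spec_remove_repeated_words (string : String) (out : String) : Prop := out = remove_repeated_words_alt string
instance (string : String) (out : String) : Decidable (Spec_remove_repeated_words string out) := by unfold Spec_remove_repeated_words; infer_instance

-- ===== CLAIM (what is proved, stated in full; the proofs are below) =====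
def Claim_equal_remove_repeated_words : Prop := ∀ (string : String), Dom_remove_repeated_words string → Spec_remove_repeated_words string (remove_repeated_words string)

-- ===== LEMMAS AND PROOFS =====

-- membership in A's repeated set: w occurs more than once in words
theorem memA_iff (words : List String) (w : String) :
    (w ∈ ((((words.foldl (fun d word => d.insert word (d.getD word 0 + 1))
        (PySem.Dict.empty : PySem.Dict String Int)).items).filter (fun p => p.2 > 1)).map
        (fun p => p.1))) ↔ 1 < words.count w := by
  simp only [PySem.Dict.foldl_insert_getD_add_one_eq_counter, PySem.Dict.items_counter]
  simp only [List.mem_map, List.mem_filter]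
  constructor
  · rintro ⟨p, ⟨⟨k, hk', rfl⟩, hc⟩, rfl⟩
    simpa using hc
  · intro h
    refine ⟨(w, (words.count w : Int)), ⟨⟨w, ?_, rfl⟩, by simpa using h⟩, rfl⟩
    exact (PySem.Set.mem_ofList words w).mpr (List.count_pos_iff.mp (by omega))

-- adjacent-equal-pair scan on a (≤)-sorted list finds exactly the words of count > 1
theorem memB_iff (l : List String) (h : l.Pairwise (· ≤ ·)) (w : String) :
    (w ∈ (((l.zip l.tail).filter (fun p => p.1 == p.2)).map (fun p => p.1))) ↔
      1 < l.count w := by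
  induction l with
  | nil => simp
  | cons a t ih =>
    cases t with
    | nil =>
      simp only [List.tail_cons, List.zip_nil_right, List.filter_nil, List.map_nil,
        List.not_mem_nil, false_iff, not_lt]
      by_cases hw : a = w <;> simp [hw]
    | cons b t' =>
      rw [List.pairwise_cons] at h
      obtain ⟨hab, ht⟩ := h
      have ih' := ih ht
      simp only [List.tail_cons, List.zip_cons_cons, List.filter_cons] at *
      by_cases hab' : a = b
      · subst hab'
        rw [if_pos (by simp)]
        simp only [List.map_cons, List.mem_cons, ih']
        by_cases hw : w = a
        · subst hw
          simp only [true_or, true_iff, List.count_cons_self]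
          omega
        · simp only [hw, false_or]
          conv_rhs => rw [List.count_cons_of_ne (fun h => hw h.symm)]
      · have hnotin : a ∉ b :: t' := by
          intro hmem
          rcases List.mem_cons.mp hmem with rfl | hmt
          · exact hab' rfl
          · exact hab' (le_antisymm (hab b List.mem_cons_self)
              ((List.pairwise_cons.mp ht).1 a hmt))
        rw [if_neg (by simpa using hab')]
        by_cases hw : w = a
        · constructor
          · intro hm
            exfalso
            obtain ⟨p, hp, hpw⟩ := List.mem_map.mp hm
            have hmem : p.1 ∈ b :: t' := (List.of_mem_zip (List.mem_of_mem_filter hp)).1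
            rw [hpw] at hmem
            exact hnotin (hw ▸ hmem)
          · intro hc
            exfalso
            rw [hw, List.count_cons_self] at hc
            exact hnotin (List.count_pos_iff.mp (by omega))
        · rw [List.count_cons_of_ne (fun h => hw h.symm)]
          exact ih'

-- the two repeated sets agree on membership, hence on contains
theorem contains_eq (words : List String) (w : String) :
    (PySem.Set.ofList ((((words.foldl (fun d word => d.insert word (d.getD word 0 + 1))
        (PySem.Dict.empty : PySem.Dict String Int)).items).filter (fun p => p.2 > 1)).map
        (fun p => p.1))).contains w =
    (PySem.Set.ofList ((((PySem.List.sorted words (fun x => x)).zip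
        (PySem.List.sorted words (fun x => x)).tail).filter (fun p => p.1 == p.2)).map
        (fun p => p.1))).contains w := by
  have hs : (PySem.List.sorted words (fun x => x)).count w = words.count w :=
    (PySem.List.sorted_perm words (fun x => x) false).count_eq w
  rw [Bool.eq_iff_iff, PySem.Set.contains_iff, PySem.Set.contains_iff,
    PySem.Set.mem_ofList, PySem.Set.mem_ofList, memA_iff,
    memB_iff _ (PySem.List.sorted_pairwise words (fun x => x)), hs]

-- ===== VERDICT (by name: the statement is the Claim_ definition above) =====
theorem remove_repeated_words_spec : Claim_equal_remove_repeated_words := by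
  intro s _
  unfold Spec_remove_repeated_words
  simp only [remove_repeated_words, remove_repeated_words_alt]
  exact congrArg PySem.Str.strip (congrArg (PySem.Str.join " ")
    (List.map_congr_left (fun w _ => by rw [contains_eq])))
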